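-- pv_equiv track=rewrite | github.com/Nexxot/Spell_Card_Converter | file_reader.py | split_string_at_sentence_middle
-- ===== SOURCE A (Python) =====
-- def split_string_at_sentence_middle(input_string):
--     # Find the middle index
--     middle_index = len(input_string) // 2
--
--     # Find the nearest sentence-ending punctuation around the middle index
--     punctuation = ['.', '!', '?']
--     for i in range(middle_index, 0, -1):
--         if input_string[i] in punctuation:
--             middle_index = i + 1  # Include the punctuation in the second part
--             break
--
--     # Split the string
--     first_part = input_string[:middle_index]
--     second_part = input_string[middle_index:]
--
--     return first_part, second_part
-- ===== SOURCE B (Python) =====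
-- def split_string_at_sentence_middle(input_string):
--     middle = len(input_string) // 2
--     hits = [i for i in range(1, middle + 1) if input_string[i] in ".!?"]
--     split = hits[-1] + 1 if hits else middle
--     return input_string[:split], input_string[split:]
-- ===== Notes on version B (the rewrite author's own statement) =====
-- stated objective: simpler
-- what changed: Replaces the backward early-exit scan for the nearest punctuation before the middle by a forward comprehension collecting all punctuation indices in [1, middle] and taking the last one (the same index), defaulting to the midpoint when none exist.
import Mathlib
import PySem

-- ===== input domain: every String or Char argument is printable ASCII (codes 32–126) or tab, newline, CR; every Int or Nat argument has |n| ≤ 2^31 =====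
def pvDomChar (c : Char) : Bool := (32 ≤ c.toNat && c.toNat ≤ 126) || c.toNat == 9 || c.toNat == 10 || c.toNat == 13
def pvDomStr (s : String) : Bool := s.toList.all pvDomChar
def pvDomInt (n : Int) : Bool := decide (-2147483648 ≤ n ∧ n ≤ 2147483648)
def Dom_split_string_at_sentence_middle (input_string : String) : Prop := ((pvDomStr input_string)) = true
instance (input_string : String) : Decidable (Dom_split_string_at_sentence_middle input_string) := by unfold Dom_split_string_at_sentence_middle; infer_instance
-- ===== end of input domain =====

-- B collects all punctuation indices in [1, middle] in one forward comprehension and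
-- takes the last, instead of A's backward early-exit scan; simpler, same O(n) cost.


-- ===== PORT A =====
-- `c in ['.', '!', '?']`
def pvIsPunct (c : Char) : Bool := c = '.' || c = '!' || c = '?'

-- A's loop: `for i in range(middle_index, 0, -1): if s[i] in punctuation: return i+1`;
-- returns none when the loop exhausts without a break. Index j is always < len on calls
-- A makes (j ≤ len//2 < len for nonempty strings), so getD is exact.
def pvScanBack (cs : List Char) : Nat → Option Nat
  | 0 => none
  | j + 1 => if pvIsPunct (cs.getD (j + 1) ' ') then some (j + 2) else pvScanBack cs j

def split_string_at_sentence_middle (input_string : String) : String × String :=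
  let cs := input_string.toList
  let middle_index := cs.length / 2
  let middle_index' := (pvScanBack cs middle_index).getD middle_index
  (String.ofList (cs.take middle_index'), String.ofList (cs.drop middle_index'))

-- ===== PORT B =====
def split_string_at_sentence_middle_alt (input_string : String) : String × String :=
  let cs := input_string.toList
  let middle := cs.length / 2
  let hits := (List.range' 1 middle).filter (fun i => pvIsPunct (cs.getD i ' '))
  let split := match hits.getLast? with
    | some j => j + 1
    | none => middle
  (String.ofList (cs.take split), String.ofList (cs.drop split))

-- ===== PRECONDITION & SPEC =====
def Spec_split_string_at_sentence_middle (input_string : String) (out : String × String) : Prop := out = split_string_at_sentence_middle_alt input_string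
instance (input_string : String) (out : String × String) : Decidable (Spec_split_string_at_sentence_middle input_string out) := by unfold Spec_split_string_at_sentence_middle; infer_instance

-- ===== CLAIM (what is proved, stated in full; the proofs are below) =====
def Claim_equal_split_string_at_sentence_middle : Prop := ∀ (input_string : String), Dom_split_string_at_sentence_middle input_string → Spec_split_string_at_sentence_middle input_string (split_string_at_sentence_middle input_string)

-- ===== LEMMAS AND PROOFS =====

-- A's first hit scanning m, m-1, …, 1 is the last hit of the forward filter over [1, m].
theorem pvScanBack_eq_getLast (cs : List Char) (m : Nat) :
    pvScanBack cs m =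
      (((List.range' 1 m).filter (fun i => pvIsPunct (cs.getD i ' '))).getLast?).map (· + 1) := by
  induction m with
  | zero => simp [pvScanBack]
  | succ n ih =>
    have hr : List.range' 1 (n + 1) = List.range' 1 n ++ [1 + n] := by
      simpa using List.range'_concat (s := 1) (n := n) (step := 1)
    rw [pvScanBack, hr, List.filter_append]
    rw [Nat.add_comm 1 n]
    by_cases h : pvIsPunct (cs.getD (n + 1) ' ')
    · rw [if_pos h]
      simp only [List.filter_cons, List.filter_nil, h, if_pos]
      rw [List.getLast?_concat]
      rfl
    · rw [if_neg h]
      simp only [List.filter_cons, List.filter_nil, h, if_neg, Bool.false_eq_true,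
        not_false_eq_true, List.append_nil]
      exact ih

-- ===== VERDICT (by name: the statement is the Claim_ definition above) =====
theorem split_string_at_sentence_middle_spec : Claim_equal_split_string_at_sentence_middle := by
  intro s _
  unfold Spec_split_string_at_sentence_middle
  unfold split_string_at_sentence_middle split_string_at_sentence_middle_alt
  simp only [pvScanBack_eq_getLast]
  cases h : ((List.range' 1 (s.toList.length / 2)).filter
      (fun i => pvIsPunct (s.toList.getD i ' '))).getLast? <;> simp [h] <;> rfl
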